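-- pv_equiv track=rewrite | github.com/Organization5762/heart | tests/test_environment_core_logic.py | _sequential_binary_merge
-- ===== SOURCE A (Python) =====
-- def _sequential_binary_merge(values: list[str]) -> str:
--     surfaces = list(values)
--     while len(surfaces) > 1:
--         pairs = [(surfaces[i], surfaces[i + 1]) for i in range(0, len(surfaces) - 1, 2)]
--         merged_surfaces = [f"merge({a},{b})" for a, b in pairs]
--         if len(surfaces) % 2 == 1:
--             merged_surfaces.append(surfaces[-1])
--         surfaces = merged_surfaces
--     return surfaces[0]
-- ===== SOURCE B (Python) =====
-- def _sequential_binary_merge(values: list[str]) -> str: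
--     # Top-down divide and conquer: split at the largest power of two strictly
--     # below len(values) (the size of the left complete subtree of A's
--     # bottom-up pairing), recurse on both halves.
--     if len(values) == 1:
--         return values[0]
--     m = 1 << ((len(values) - 1).bit_length() - 1)
--     return f"merge({_sequential_binary_merge(values[:m])},{_sequential_binary_merge(values[m:])})"
-- ===== Notes on version B (the rewrite author's own statement) =====
-- stated objective: alternative
-- what changed: Replaces A's bottom-up level-by-level pairing loop (rebuilding the whole list each round) with a top-down recursive divide-and-conquer that splits at the largest power of two below the length.
import Mathlib
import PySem

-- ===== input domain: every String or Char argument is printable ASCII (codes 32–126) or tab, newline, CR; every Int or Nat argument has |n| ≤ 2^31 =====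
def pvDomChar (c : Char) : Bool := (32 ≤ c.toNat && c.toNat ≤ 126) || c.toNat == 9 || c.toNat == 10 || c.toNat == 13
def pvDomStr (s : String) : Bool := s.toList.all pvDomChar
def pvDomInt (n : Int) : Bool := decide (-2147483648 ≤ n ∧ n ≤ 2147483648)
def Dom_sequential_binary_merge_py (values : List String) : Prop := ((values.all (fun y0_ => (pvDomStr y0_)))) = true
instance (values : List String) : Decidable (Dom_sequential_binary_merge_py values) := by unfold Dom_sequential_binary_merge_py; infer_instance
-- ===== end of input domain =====

-- B is a top-down divide-and-conquer producing the same bracketing as A's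
-- bottom-up level-by-level pairing loop; equivalence proved on nonempty lists
-- (on [] the Python A raises IndexError, excluded by Pre_).

-- ===== PORT A =====

-- the f-string f"merge({a},{b})"
def pvMerge2 (a b : String) : String := "merge(" ++ a ++ "," ++ b ++ ")"

-- one iteration of A's while-body: pairs over range(0, len-1, 2) mapped to
-- merge-strings, with the odd leftover appended — exactly adjacent pairing
-- left to right keeping a trailing unpaired element
def pvPassA : List String → List String
  | [] => []
  | [x] => [x]
  | a :: b :: rest => pvMerge2 a b :: pvPassA rest

-- needed by pvLoopA's termination
lemma pvPassA_length (s : List String) : (pvPassA s).length = (s.length + 1) / 2 := by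
  induction s using pvPassA.induct with
  | case1 => rfl
  | case2 x => simp [pvPassA]
  | case3 a b rest ih => simp [pvPassA, ih]; omega

-- A's while-loop
def pvLoopA (surfaces : List String) : String :=
  if 1 < surfaces.length then pvLoopA (pvPassA surfaces)
  else (PySem.List.pyGet? surfaces 0).getD ""   -- surfaces[0]; [] is outside Pre_
termination_by surfaces.length
decreasing_by rw [pvPassA_length]; omega

def sequential_binary_merge_py (values : List String) : String :=
  pvLoopA values

-- ===== PORT B =====

-- Source B: if len == 1 return values[0]; else split at m = 1 << ((len-1).bit_length()-1)
-- (= 2 ^ Nat.log2 (len-1)) and recurse on the two slices.  The base guard is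
-- `≤ 1` only to make the recursion total: Python raises on [] (outside Pre_).
def sequential_binary_merge_py_alt (values : List String) : String :=
  if values.length ≤ 1 then (PySem.List.pyGet? values 0).getD ""
  else
    let m := 2 ^ Nat.log2 (values.length - 1)
    pvMerge2 (sequential_binary_merge_py_alt (values.take m))
             (sequential_binary_merge_py_alt (values.drop m))
termination_by values.length
decreasing_by
  · have h := (Nat.le_log2 (n := values.length - 1) (by omega)).mp le_rfl
    simp; omega
  · have h : 0 < 2 ^ Nat.log2 (values.length - 1) := Nat.two_pow_pos _
    simp; omega

-- ===== PRECONDITION & SPEC =====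
-- Pre_ excludes the empty list, on which the Python A raises IndexError.
def Pre_sequential_binary_merge_py (values : List String) : Prop := values ≠ []
instance (values : List String) : Decidable (Pre_sequential_binary_merge_py values) := by unfold Pre_sequential_binary_merge_py; infer_instance
def pvWitness_sequential_binary_merge_py : List String := ["a", "b", "c"]

def Spec_sequential_binary_merge_py (values : List String) (out : String) : Prop := out = sequential_binary_merge_py_alt values
instance (values : List String) (out : String) : Decidable (Spec_sequential_binary_merge_py values out) := by unfold Spec_sequential_binary_merge_py; infer_instance

-- ===== CLAIM (what is proved, stated in full; the proofs are below) =====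
def Claim_equal_sequential_binary_merge_py : Prop := ∀ (values : List String), Dom_sequential_binary_merge_py values → Pre_sequential_binary_merge_py values → Spec_sequential_binary_merge_py values (sequential_binary_merge_py values)

-- ===== LEMMAS AND PROOFS =====

lemma pvLog2_unique {n k : ℕ} (h1 : 2 ^ k ≤ n) (h2 : n < 2 ^ (k + 1)) : Nat.log2 n = k := by
  have hn : n ≠ 0 := by have : 0 < 2 ^ k := Nat.two_pow_pos _; omega
  have a := (Nat.le_log2 hn).mpr h1
  have b := (Nat.log2_lt hn).mpr h2
  omega

lemma pvPassA_append (xs ys : List String) (h : xs.length % 2 = 0) :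
    pvPassA (xs ++ ys) = pvPassA xs ++ pvPassA ys := by
  induction xs using pvPassA.induct with
  | case1 => simp [pvPassA]
  | case2 x => simp at h
  | case3 a b rest ih =>
      simp only [List.cons_append, pvPassA, List.length_cons] at *
      rw [ih (by omega)]

lemma pvAlt_short {s : List String} (h : s.length ≤ 1) :
    sequential_binary_merge_py_alt s = (PySem.List.pyGet? s 0).getD "" := by
  rw [sequential_binary_merge_py_alt]; simp [h]

lemma pvAlt_long {s : List String} (h : 1 < s.length) :
    sequential_binary_merge_py_alt s =
      pvMerge2 (sequential_binary_merge_py_alt (s.take (2 ^ Nat.log2 (s.length - 1))))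
               (sequential_binary_merge_py_alt (s.drop (2 ^ Nat.log2 (s.length - 1)))) := by
  rw [sequential_binary_merge_py_alt]
  simp [Nat.not_le.mpr h]

lemma pvAlt_one (x : String) : sequential_binary_merge_py_alt [x] = x := by
  rw [pvAlt_short (by simp)]
  simp

lemma pvAlt_two (x y : String) : sequential_binary_merge_py_alt [x, y] = pvMerge2 x y := by
  rw [pvAlt_long (by simp)]
  have h1 : (2 : ℕ) ^ Nat.log2 ([x, y].length - 1) = 1 := by
    simp only [List.length_cons, List.length_nil]
    decide
  rw [h1]
  simp only [List.take, List.drop]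
  rw [pvAlt_one, pvAlt_one]

-- the crux: one bottom-up pairing pass does not change B's result
lemma pvAlt_pass : ∀ (n : ℕ) (s : List String), s.length = n →
    sequential_binary_merge_py_alt (pvPassA s) = sequential_binary_merge_py_alt s := by
  intro n
  induction n using Nat.strong_induction_on with
  | _ n ih =>
    intro s hs
    match s with
    | [] => rfl
    | [a] => rfl
    | [a, b] =>
        rw [show pvPassA [a, b] = [pvMerge2 a b] from rfl, pvAlt_one, pvAlt_two]
    | [a, b, c] =>
        rw [show pvPassA [a, b, c] = [pvMerge2 a b, c] from rfl,
            pvAlt_two, pvAlt_long (s := [a, b, c]) (by simp)]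
        have h2 : (2 : ℕ) ^ Nat.log2 ([a, b, c].length - 1) = 2 := by
          simp only [List.length_cons, List.length_nil]
          decide
        rw [h2]
        simp only [List.take, List.drop]
        rw [pvAlt_two, pvAlt_one]
    | a :: b :: c :: d :: rest =>
        -- n ≥ 4: split at 2^e, e = log2 (n-1) ≥ 1, so the split point is even,
        -- the pass distributes over the split, and the split point halves.
        have hlen : (a :: b :: c :: d :: rest).length = n := hs
        have hn4 : 4 ≤ n := by simp at hlen; omega
        set s' : List String := a :: b :: c :: d :: rest with hs'
        set e := Nat.log2 (n - 1) with he
        have hle : 2 ^ e ≤ n - 1 := (Nat.le_log2 (by omega)).mp le_rfl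
        have hlt : n - 1 < 2 ^ (e + 1) := (Nat.log2_lt (by omega)).mp (by omega)
        have he1 : 1 ≤ e := by
          by_contra hc
          interval_cases e <;> omega
        have hpow : 2 ^ e = 2 * 2 ^ (e - 1) := by
          rw [← pow_succ']; congr 1; omega
        have hpow2 : 2 ^ (e + 1) = 2 * 2 ^ e := by rw [pow_succ]; ring
        have hm2 : 2 ≤ 2 ^ e := by omega
        have hmlt : 2 ^ e < n := by omega
        have htlen : (s'.take (2 ^ e)).length = 2 ^ e := by simp [hlen]; omega
        have hdlen : (s'.drop (2 ^ e)).length = n - 2 ^ e := by simp [hlen]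
        have hdist : pvPassA s' = pvPassA (s'.take (2 ^ e)) ++ pvPassA (s'.drop (2 ^ e)) := by
          conv_lhs => rw [(List.take_append_drop (2 ^ e) s').symm]
          exact pvPassA_append _ _ (by omega)
        have hplen : (pvPassA s').length = (n + 1) / 2 := by rw [pvPassA_length, hlen]
        have hptlen : (pvPassA (s'.take (2 ^ e))).length = 2 ^ (e - 1) := by
          rw [pvPassA_length, htlen]; omega
        have hlog : Nat.log2 ((n + 1) / 2 - 1) = e - 1 := by
          apply pvLog2_unique
          · omega
          · have hee : e - 1 + 1 = e := by omega
            rw [hee]; omega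
        have hm' : 2 ^ Nat.log2 ((pvPassA s').length - 1) = 2 ^ (e - 1) := by
          rw [hplen, hlog]
        rw [pvAlt_long (s := pvPassA s') (by omega), hm', hdist]
        rw [List.take_left' hptlen, List.drop_left' hptlen]
        rw [ih (2 ^ e) (by omega) (s'.take (2 ^ e)) htlen,
            ih (n - 2 ^ e) (by omega) (s'.drop (2 ^ e)) hdlen]
        rw [pvAlt_long (s := s') (by omega), hlen, ← he]

lemma pvLoopA_eq_alt : ∀ (n : ℕ) (s : List String), s.length = n →
    pvLoopA s = sequential_binary_merge_py_alt s := by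
  intro n
  induction n using Nat.strong_induction_on with
  | _ n ih =>
    intro s hs
    rw [pvLoopA]
    by_cases h : 1 < s.length
    · simp only [h, if_true]
      rw [ih ((n + 1) / 2) (by omega) (pvPassA s) (by rw [pvPassA_length, hs])]
      exact pvAlt_pass n s hs
    · simp only [h, if_false]
      rw [pvAlt_short (by omega)]

-- ===== VERDICT (by name: the statement is the Claim_ definition above) =====
theorem sequential_binary_merge_py_spec : Claim_equal_sequential_binary_merge_py := by
  intro values _ _
  unfold Spec_sequential_binary_merge_py sequential_binary_merge_py
  exact pvLoopA_eq_alt values.length values rfl
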